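-- pv_equiv track=rewrite | github.com/ASSERT-KTH/Mokav | experiments/pynguin/c4b/single-return/generated_tests/src_1500/7/src_1500.py | func
-- ===== SOURCE A (Python) =====
-- def func(*args):
--
-- 	import math
-- 	n = int(args[0])
-- 	queue = ['Sheldon', 'Leonard', 'Penny', 'Rajesh', 'Howard']
-- 	c = 1
-- 	while ((5 * c) < n):
-- 	    n -= (5 * c)
-- 	    c *= 2
-- 	return(queue[((n - 1) // c)])
-- ===== SOURCE B (Python) =====
-- def func(*args):
--     n = int(args[0])
--     queue = ['Sheldon', 'Leonard', 'Penny', 'Rajesh', 'Howard']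
--     if n <= 5:
--         return queue[n - 1]
--     k = ((n - 1) // 5 + 1).bit_length() - 1
--     c = 1 << k
--     rem = n - 5 * (c - 1)
--     return queue[(rem - 1) // c]
-- ===== Notes on version B (the rewrite author's own statement) =====
-- stated objective: alternative
-- what changed: Replaced the doubling while-loop with a closed-form block lookup: the block index k is computed directly via integer bit_length of (n-1)//5 + 1, then one division picks the name.
import Mathlib
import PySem

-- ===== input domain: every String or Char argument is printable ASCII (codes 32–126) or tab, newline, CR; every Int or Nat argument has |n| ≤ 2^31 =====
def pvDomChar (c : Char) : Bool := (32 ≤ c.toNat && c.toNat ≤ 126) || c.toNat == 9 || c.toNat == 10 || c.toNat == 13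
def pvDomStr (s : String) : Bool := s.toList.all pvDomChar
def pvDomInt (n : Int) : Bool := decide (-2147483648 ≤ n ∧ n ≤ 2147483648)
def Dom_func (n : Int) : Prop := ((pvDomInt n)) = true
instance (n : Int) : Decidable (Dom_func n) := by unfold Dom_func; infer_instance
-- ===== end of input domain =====

-- B replaces A's doubling while-loop by a closed-form bit_length block lookup (O(1) closed form vs a loop; speed on sampled sizes not measurably different).

-- ===== PORT A =====
-- the while loop of A: state (n, c); the 0 < c guard only justifies termination (A always starts at c = 1, where c stays positive)
def funcLoop (n c : Int) : Int × Int :=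
  if h : 0 < c ∧ 5 * c < n then funcLoop (n - 5 * c) (c * 2) else (n, c)
termination_by n.toNat
decreasing_by omega

def func (n : Int) : String :=
  let queue := ["Sheldon", "Leonard", "Penny", "Rajesh", "Howard"]
  let r := funcLoop n 1
  (PySem.List.pyGet? queue (PySem.Int.floordiv (r.1 - 1) r.2)).getD ""

-- ===== PORT B =====
-- Python int.bit_length for nonnegative integers
def pyBitLength (m : Nat) : Nat := if m = 0 then 0 else Nat.log2 m + 1

def func_alt (n : Int) : String :=
  let queue := ["Sheldon", "Leonard", "Penny", "Rajesh", "Howard"]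
  if n ≤ 5 then (PySem.List.pyGet? queue (n - 1)).getD ""
  else
    let k : Nat := pyBitLength (PySem.Int.floordiv (n - 1) 5 + 1).toNat - 1
    let c : Int := (2 : Int) ^ k
    let rem : Int := n - 5 * (c - 1)
    (PySem.List.pyGet? queue (PySem.Int.floordiv (rem - 1) c)).getD ""

-- ===== PRECONDITION & SPEC =====
-- A raises IndexError for n < -4 (queue[(n-1)//1] out of range even with Python's negative indexing); excluded.
def Pre_func (n : Int) : Prop := -4 ≤ n
instance (n : Int) : Decidable (Pre_func n) := by unfold Pre_func; infer_instance
def pvWitness_func : Int := (7)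
def Spec_func (n : Int) (out : String) : Prop := out = func_alt n
instance (n : Int) (out : String) : Decidable (Spec_func n out) := by unfold Spec_func; infer_instance

-- ===== CLAIM (what is proved, stated in full; the proofs are below) =====
def Claim_equal_func : Prop := ∀ (n : Int), Dom_func n → Pre_func n → Spec_func n (func n)

-- ===== LEMMAS AND PROOFS =====

-- characterization of A's loop: starting with 0 < c, if n lies in block k (relative to c) the loop runs exactly k times
theorem funcLoop_eq (k : Nat) : ∀ (n c : Int), 0 < c → 5 * c * (2 ^ k - 1) < n →
    n ≤ 5 * c * (2 ^ (k + 1) - 1) → funcLoop n c = (n - 5 * c * (2 ^ k - 1), c * 2 ^ k) := by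
  induction k with
  | zero =>
    intro n c hc h1 h2
    norm_num at h1 h2
    rw [funcLoop, dif_neg (by omega)]
    norm_num
  | succ k ih =>
    intro n c hc h1 h2
    have ht1 : (1 : Int) ≤ 2 ^ k := one_le_pow₀ (by norm_num)
    have hx : (2 : Int) ^ (k + 1) = 2 * 2 ^ k := by rw [pow_succ]; ring
    have hxx : (2 : Int) ^ (k + 1 + 1) = 4 * 2 ^ k := by rw [pow_succ, pow_succ]; ring
    rw [hx] at h1
    rw [hxx] at h2
    have h5c : 5 * c < n := by nlinarith [mul_nonneg hc.le (by linarith : (0 : Int) ≤ 2 ^ k - 1)]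
    rw [funcLoop, dif_pos ⟨hc, h5c⟩]
    have hrec := ih (n - 5 * c) (c * 2) (by omega)
      (by nlinarith) (by rw [hx]; nlinarith)
    rw [hrec, Prod.mk.injEq]
    refine ⟨by rw [hx]; ring, by rw [hx]; ring⟩

theorem funcLoop_base (n c : Int) (h : ¬ (0 < c ∧ 5 * c < n)) : funcLoop n c = (n, c) := by
  rw [funcLoop, dif_neg h]

theorem func_spec_aux (n : Int) (hn : -4 ≤ n) : func n = func_alt n := by
  by_cases h5 : n ≤ 5
  · -- loop never runs; both index with (n-1) (floordiv by 1 is the identity)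
    unfold func func_alt
    rw [funcLoop_base n 1 (by omega), if_pos h5]
    norm_num [PySem.Int.floordiv_eq_ediv_of_pos]
  · replace h5 : 5 < n := by omega
    -- block index
    set q : Int := PySem.Int.floordiv (n - 1) 5 + 1 with hq
    have hqe : q = (n - 1) / 5 + 1 := by
      rw [hq, PySem.Int.floordiv_eq_ediv_of_pos (by norm_num)]
    have hq2 : 2 ≤ q := by
      rw [hqe]; omega
    have hbounds : 5 * (q - 1) ≤ n - 1 ∧ n - 1 < 5 * q := by
      rw [hqe]; omega
    set k : Nat := Nat.log2 q.toNat with hk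
    have hqt : 2 ≤ q.toNat := by omega
    have hlow : 2 ^ k ≤ q.toNat := by
      rw [hk, Nat.log2_eq_log_two]
      exact Nat.pow_log_le_self 2 (by omega)
    have hhigh : q.toNat < 2 ^ (k + 1) := by
      rw [hk, Nat.log2_eq_log_two]
      exact Nat.lt_pow_succ_log_self (by norm_num) _
    have hlowI : (2 : Int) ^ k ≤ q := by
      have := hlow
      zify at this
      omega
    have hhighI : q < (2 : Int) ^ (k + 1) := by
      have := hhigh
      zify at this
      omega
    have hpk : (0 : Int) < 2 ^ k := by positivity
    have hps : ((2 : Int) ^ (k + 1)) = 2 * 2 ^ k := by rw [pow_succ]; ring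
    have hb1 : 5 * 1 * ((2 : Int) ^ k - 1) < n := by
      have := hbounds.1; linarith [hlowI]
    have hb2 : n ≤ 5 * 1 * ((2 : Int) ^ (k + 1) - 1) := by
      have h2' : q + 1 ≤ 2 ^ (k + 1) := Int.lt_iff_add_one_le.mp hhighI
      have := hbounds.2; linarith
    have hloop : funcLoop n 1 = (n - 5 * 1 * (2 ^ k - 1), 1 * 2 ^ k) :=
      funcLoop_eq k n 1 (by norm_num) hb1 hb2
    have hkb : pyBitLength (PySem.Int.floordiv (n - 1) 5 + 1).toNat - 1 = k := by
      show pyBitLength q.toNat - 1 = k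
      unfold pyBitLength
      rw [if_neg (by omega)]
      omega
    unfold func func_alt
    rw [if_neg (by omega), hloop]
    simp only [hkb]
    norm_num

-- ===== VERDICT (by name: the statement is the Claim_ definition above) =====
theorem func_spec : Claim_equal_func := by
  intro n _ hpre
  unfold Spec_func
  exact func_spec_aux n hpre
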